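-- pv_equiv track=rewrite | github.com/fl-sean03/pcp | scripts/core_sync.py | parse_projects_md
-- ===== SOURCE A (Python) =====
-- from typing import Any, Dict, List, Optional, Tuple
--
-- def parse_projects_md(content: str) -> List[Dict]:
--     """Parse PROJECTS.md into structured data."""
--     projects = []
--     current_project = None
--     in_table = False
--
--     lines = content.split("\n")
--     for i, line in enumerate(lines):
--         # New project heading
--         if line.startswith("### "):
--             if current_project:
--                 projects.append(current_project)
--             name = line[4:].strip()
--             current_project = {"name": name, "status": "active", "description": ""}
--             in_table = False
--
--         # Table row
--         elif current_project and "|" in line and "---" not in line: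
--             parts = [p.strip() for p in line.split("|")]
--             if len(parts) >= 3:
--                 field = parts[1].replace("**", "").lower()
--                 value = parts[2].replace("**", "")
--
--                 if "status" in field:
--                     current_project["status"] = value.lower()
--                 elif "type" in field:
--                     current_project["type"] = value
--                 elif "focus" in field:
--                     current_project["focus"] = value
--                 elif "description" in field:
--                     current_project["description"] = value
--
--         # Description paragraph
--         elif current_project and line.startswith("**Description**:"):
--             current_project["description"] = line.replace("**Description**:", "").strip()
--
--     if current_project:
--         projects.append(current_project)
--
--     return projects
-- ===== SOURCE B (Python) =====
-- from typing import Dict, List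
--
--
-- def _apply_line(proj: Dict, line: str) -> Dict:
--     if "|" in line and "---" not in line:
--         parts = [p.strip() for p in line.split("|")]
--         if len(parts) >= 3:
--             field = parts[1].replace("**", "").lower()
--             value = parts[2].replace("**", "")
--             if "status" in field:
--                 proj["status"] = value.lower()
--             elif "type" in field:
--                 proj["type"] = value
--             elif "focus" in field:
--                 proj["focus"] = value
--             elif "description" in field:
--                 proj["description"] = value
--     elif line.startswith("**Description**:"):
--         proj["description"] = line.replace("**Description**:", "").strip()
--     return proj
--
--
-- def parse_projects_md(content: str) -> List[Dict]:
--     """Parse PROJECTS.md by segmenting the lines into '### '-headed blocks."""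
--     lines = content.split("\n")
--     n = len(lines)
--     k = 0
--     while k < n and not lines[k].startswith("### "):
--         k += 1
--     projects = []
--     while k < n:
--         j = k + 1
--         while j < n and not lines[j].startswith("### "):
--             j += 1
--         proj = {"name": lines[k][4:].strip(), "status": "active", "description": ""}
--         for line in lines[k + 1:j]:
--             proj = _apply_line(proj, line)
--         projects.append(proj)
--         k = j
--     return projects
-- ===== Notes on version B (the rewrite author's own statement) =====
-- stated objective: alternative
-- what changed: B replaces A's single pass with an optional current-project accumulator and trailing flush by a two-level segmentation: skip the preamble lines before the first project heading, then repeatedly scan ahead to the next heading line and fold each block's body lines independently into its project dict.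
import Mathlib
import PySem

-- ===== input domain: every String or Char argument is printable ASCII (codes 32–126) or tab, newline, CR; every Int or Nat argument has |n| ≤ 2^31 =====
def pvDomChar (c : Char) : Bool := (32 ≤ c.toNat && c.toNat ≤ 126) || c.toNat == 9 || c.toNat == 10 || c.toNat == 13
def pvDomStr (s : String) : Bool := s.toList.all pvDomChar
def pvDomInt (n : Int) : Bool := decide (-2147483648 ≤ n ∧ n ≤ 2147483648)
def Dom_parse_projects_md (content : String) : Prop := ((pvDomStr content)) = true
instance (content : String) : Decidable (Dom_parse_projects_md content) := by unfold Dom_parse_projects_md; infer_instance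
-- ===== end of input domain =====

-- B re-parses the markdown by first skipping the preamble and then segmenting the lines into
-- '### '-headed blocks folded independently, instead of A's single pass with an optional
-- current-project accumulator; objective: alternative decomposition (same cost), same return value.

-- ===== PORT A =====
-- the loop body of A's single `for line in lines` loop (A's `i` from enumerate and `in_table`
-- are never read, so they are omitted from the fold state); state = (projects, current_project)
def pvStepA (st : List (PySem.Dict String String) × Option (PySem.Dict String String))
    (line : String) : List (PySem.Dict String String) × Option (PySem.Dict String String) :=
  if PySem.Str.startswith line "### " then
    ((match st.2 with | some c => st.1 ++ [c] | none => st.1),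
     some (((PySem.Dict.empty.insert "name"
              (PySem.Str.strip (PySem.Str.slice line (some 4) none))).insert "status"
              "active").insert "description" ""))
  else
    match st.2 with
    | none => st
    | some c =>
      if PySem.Str.isIn "|" line && !(PySem.Str.isIn "---" line) then
        let parts := ((PySem.Str.split? line "|").getD []).map PySem.Str.strip  -- sep "|" ≠ "", split? is some
        if 3 ≤ parts.length then
          let field := PySem.Str.lower (PySem.Str.replace (parts.getD 1 "") "**" "")
          let value := PySem.Str.replace (parts.getD 2 "") "**" ""
          if PySem.Str.isIn "status" field then (st.1, some (c.insert "status" (PySem.Str.lower value)))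
          else if PySem.Str.isIn "type" field then (st.1, some (c.insert "type" value))
          else if PySem.Str.isIn "focus" field then (st.1, some (c.insert "focus" value))
          else if PySem.Str.isIn "description" field then (st.1, some (c.insert "description" value))
          else (st.1, some c)
        else (st.1, some c)
      else if PySem.Str.startswith line "**Description**:" then
        (st.1, some (c.insert "description" (PySem.Str.strip (PySem.Str.replace line "**Description**:" ""))))
      else (st.1, some c)

def parse_projects_md (content : String) : List (List (String × String)) :=
  let lines := (PySem.Str.split? content "\n").getD []  -- sep "\n" ≠ "", split? is some
  let s := lines.foldl pvStepA ([], none)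
  let res : List (PySem.Dict String String) := match s.2 with | some c => s.1 ++ [c] | none => s.1
  res.map (fun d => d.items)

-- ===== PORT B =====
-- B's helper _apply_line: one non-heading body line applied to a project dict
def pvApplyLine (proj : PySem.Dict String String) (line : String) : PySem.Dict String String :=
  if PySem.Str.isIn "|" line && !(PySem.Str.isIn "---" line) then
    let parts := ((PySem.Str.split? line "|").getD []).map PySem.Str.strip
    if 3 ≤ parts.length then
      let field := PySem.Str.lower (PySem.Str.replace (parts.getD 1 "") "**" "")
      let value := PySem.Str.replace (parts.getD 2 "") "**" ""
      if PySem.Str.isIn "status" field then proj.insert "status" (PySem.Str.lower value)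
      else if PySem.Str.isIn "type" field then proj.insert "type" value
      else if PySem.Str.isIn "focus" field then proj.insert "focus" value
      else if PySem.Str.isIn "description" field then proj.insert "description" value
      else proj
    else proj
  else if PySem.Str.startswith line "**Description**:" then
    proj.insert "description" (PySem.Str.strip (PySem.Str.replace line "**Description**:" ""))
  else proj

-- the inner `while j < n and not lines[j].startswith("### ")` scan: (block body, rest of lines)
def pvSpanBody : List String → List String × List String
  | [] => ([], [])
  | l :: t =>
    if PySem.Str.startswith l "### " then ([], l :: t)
    else let p := pvSpanBody t; (l :: p.1, p.2)

theorem pvSpanBody_rest_le : ∀ (t : List String), (pvSpanBody t).2.length ≤ t.length := by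
  intro t
  induction t with
  | nil => exact le_rfl
  | cons l t ih =>
    simp only [pvSpanBody]
    split
    · simp
    · simpa using Nat.le_succ_of_le ih

-- B's outer `while k < n` loop: the list argument always starts at a heading line (or is empty)
def pvBlocks : List String → List (PySem.Dict String String)
  | [] => []
  | h :: t =>
    let p := pvSpanBody t
    (p.1.foldl pvApplyLine
      (((PySem.Dict.empty.insert "name"
          (PySem.Str.strip (PySem.Str.slice h (some 4) none))).insert "status"
          "active").insert "description" ""))
      :: pvBlocks p.2
termination_by l => l.length
decreasing_by
  simpa using Nat.lt_succ_of_le (pvSpanBody_rest_le t)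

def parse_projects_md_alt (content : String) : List (List (String × String)) :=
  let lines := (PySem.Str.split? content "\n").getD []  -- sep "\n" ≠ "", split? is some
  (pvBlocks (lines.dropWhile (fun l => !PySem.Str.startswith l "### "))).map (fun d => d.items)

-- ===== PRECONDITION & SPEC =====
def Spec_parse_projects_md (content : String) (out : List (List (String × String))) : Prop := out = parse_projects_md_alt content
instance (content : String) (out : List (List (String × String))) : Decidable (Spec_parse_projects_md content out) := by unfold Spec_parse_projects_md; infer_instance

-- ===== CLAIM (what is proved, stated in full; the proofs are below) =====
def Claim_equal_parse_projects_md : Prop := ∀ (content : String), Dom_parse_projects_md content → Spec_parse_projects_md content (parse_projects_md content)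

-- ===== LEMMAS AND PROOFS =====

-- with no current project, a non-heading line leaves A's state unchanged
theorem pvStepA_none (line : String) (acc : List (PySem.Dict String String))
    (h : PySem.Str.startswith line "### " = false) :
    pvStepA (acc, none) line = (acc, none) := by
  simp at h
  simp [pvStepA, h]

-- with a current project, a non-heading line acts exactly as B's _apply_line
theorem pvStepA_some (line : String) (acc : List (PySem.Dict String String))
    (c : PySem.Dict String String) (h : PySem.Str.startswith line "### " = false) :
    pvStepA (acc, some c) line = (acc, some (pvApplyLine c line)) := by
  simp only [pvStepA, pvApplyLine]
  rw [h]
  simp only [Bool.false_eq_true, if_false]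
  split_ifs <;> rfl

-- main invariant: once a project is open, A's remaining fold produces exactly the block B
-- computes for the current body plus B's blocks for the rest
theorem pvFold_some (L : List String) :
    ∀ (acc : List (PySem.Dict String String)) (c : PySem.Dict String String),
    (match (L.foldl pvStepA (acc, some c)).2 with
      | some d => (L.foldl pvStepA (acc, some c)).1 ++ [d]
      | none => (L.foldl pvStepA (acc, some c)).1)
    = acc ++ ((pvSpanBody L).1.foldl pvApplyLine c) :: pvBlocks (pvSpanBody L).2 := by
  induction L with
  | nil => intro acc c; simp [pvSpanBody, pvBlocks]
  | cons l t ih =>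
    intro acc c
    by_cases h : PySem.Str.startswith l "### " = true
    · have h' := h; simp at h'
      rw [List.foldl_cons]
      have hstep : pvStepA (acc, some c) l
          = (acc ++ [c],
             some (((PySem.Dict.empty.insert "name"
                (PySem.Str.strip (PySem.Str.slice l (some 4) none))).insert "status"
                "active").insert "description" "")) := by
        simp [pvStepA, h']
      rw [hstep, ih]
      simp [pvSpanBody, h', pvBlocks]
    · rw [Bool.not_eq_true] at h
      have h' := h; simp at h'
      rw [List.foldl_cons, pvStepA_some l acc c h, ih]
      simp [pvSpanBody, h']

-- top-level: A's whole loop (started with no current project) equals B's skip-then-blocks pass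
theorem pvTop (L : List String) :
    (match (L.foldl pvStepA ([], none)).2 with
      | some d => (L.foldl pvStepA ([], none)).1 ++ [d]
      | none => (L.foldl pvStepA ([], none)).1)
    = pvBlocks (L.dropWhile (fun l => !PySem.Str.startswith l "### ")) := by
  induction L with
  | nil => simp [pvBlocks]
  | cons l t ih =>
    by_cases h : PySem.Str.startswith l "### " = true
    · have h' := h; simp at h'
      rw [List.foldl_cons]
      have hstep : pvStepA (([] : List (PySem.Dict String String)), none) l
          = ([], some (((PySem.Dict.empty.insert "name"
              (PySem.Str.strip (PySem.Str.slice l (some 4) none))).insert "status"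
              "active").insert "description" "")) := by
        simp [pvStepA, h']
      rw [hstep, pvFold_some t]
      simp [List.dropWhile, h', pvBlocks]
    · rw [Bool.not_eq_true] at h
      have h' := h; simp at h'
      have hdrop : (l :: t).dropWhile (fun l => !PySem.Str.startswith l "### ")
          = t.dropWhile (fun l => !PySem.Str.startswith l "### ") := by
        simp [List.dropWhile, h']
      rw [List.foldl_cons, pvStepA_none l [] h, hdrop]
      exact ih

-- ===== VERDICT (by name: the statement is the Claim_ definition above) =====
theorem parse_projects_md_spec : Claim_equal_parse_projects_md := by
  intro content _
  show parse_projects_md content = parse_projects_md_alt content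
  exact congrArg (List.map (fun d => PySem.Dict.items d))
    (pvTop ((PySem.Str.split? content "\n").getD []))
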